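-- pv_equiv track=rewrite | github.com/cjarchibald/codenames-ensemble | play_games/utils/results_analyzer.py | get_event_arrays
-- ===== SOURCE A (Python) =====
-- def get_event_arrays(num_rounds_per_game, red_words_flipped_by_round, \
--     blue_words_flipped_by_round, bystander_words_flipped_by_round, assassin_words_flipped_by_round):
--     event_arrays = []
--
--     curr_ind = 0
--     for i in range(len(num_rounds_per_game)):
--         event_arrays.append([])
--         for j in range(curr_ind, curr_ind + int(num_rounds_per_game[i])):
--             rwf = red_words_flipped_by_round[j]
--             bwf = blue_words_flipped_by_round[j]
--             bywf = bystander_words_flipped_by_round[j]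
--             awf = assassin_words_flipped_by_round[j]
--
--             event_arrays[i].append([rwf, bwf, bywf, awf])
--
--         curr_ind += int(num_rounds_per_game[i])
--
--     return event_arrays
-- ===== SOURCE B (Python) =====
-- def get_event_arrays(num_rounds_per_game, red_words_flipped_by_round, \
--     blue_words_flipped_by_round, bystander_words_flipped_by_round, assassin_words_flipped_by_round):
--     total = 0
--     for n in num_rounds_per_game:
--         total += int(n)
--     events = [[red_words_flipped_by_round[j], blue_words_flipped_by_round[j],
--                bystander_words_flipped_by_round[j], assassin_words_flipped_by_round[j]]
--               for j in range(total)]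
--     event_arrays = []
--     offset = 0
--     for n in num_rounds_per_game:
--         k = int(n)
--         event_arrays.append(events[offset:offset + k])
--         offset += k
--     return event_arrays
-- ===== Notes on version B (the rewrite author's own statement) =====
-- stated objective: alternative
-- what changed: Replaced A's nested index-copy loop (outer over games, inner copying rows one index at a time into event_arrays[i]) by a flatten-then-partition decomposition: one pass builds the flat list of per-round event rows, then each game's sublist is a slice of that flat list at a running offset.
-- outside the precondition, e.g. on get_event_arrays([1, -1], [1, -1], [1, 1], [0, 0], [9, 5]): A returns [[[1, 1, 0, 9]], []], B returns [[], []]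
import Mathlib
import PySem

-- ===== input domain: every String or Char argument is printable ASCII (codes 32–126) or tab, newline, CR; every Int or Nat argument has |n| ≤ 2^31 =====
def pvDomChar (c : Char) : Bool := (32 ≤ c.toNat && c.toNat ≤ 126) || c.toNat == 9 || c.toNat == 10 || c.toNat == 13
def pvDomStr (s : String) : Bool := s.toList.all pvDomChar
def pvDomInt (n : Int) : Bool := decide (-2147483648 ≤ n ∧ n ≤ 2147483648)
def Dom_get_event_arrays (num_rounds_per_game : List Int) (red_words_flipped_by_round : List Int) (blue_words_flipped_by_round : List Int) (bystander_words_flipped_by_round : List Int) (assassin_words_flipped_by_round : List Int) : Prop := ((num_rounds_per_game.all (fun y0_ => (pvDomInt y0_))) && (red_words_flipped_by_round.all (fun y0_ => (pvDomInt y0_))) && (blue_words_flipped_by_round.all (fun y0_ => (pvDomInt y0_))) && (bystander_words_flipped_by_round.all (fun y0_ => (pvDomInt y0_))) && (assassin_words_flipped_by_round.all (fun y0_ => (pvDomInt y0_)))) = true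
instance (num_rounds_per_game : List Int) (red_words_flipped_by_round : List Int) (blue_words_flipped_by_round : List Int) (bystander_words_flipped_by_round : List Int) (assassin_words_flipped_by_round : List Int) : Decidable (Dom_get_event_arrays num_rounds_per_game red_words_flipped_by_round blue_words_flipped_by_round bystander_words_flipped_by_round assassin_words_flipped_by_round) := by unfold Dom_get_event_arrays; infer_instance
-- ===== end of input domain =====

-- B replaces A's nested index-copy loop by a flatten-then-partition decomposition: one flat
-- list of per-round event rows built by a single pass, then slices of it per game (objective:
-- alternative decomposition, same cost; return value only, no mutation involved).

-- ===== PORT A =====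
-- A: outer loop over game indices i, inner loop copies rows j = curr_ind .. curr_ind+n-1.
def get_event_arrays (num_rounds_per_game : List Int) (red_words_flipped_by_round : List Int) (blue_words_flipped_by_round : List Int) (bystander_words_flipped_by_round : List Int) (assassin_words_flipped_by_round : List Int) : List (List (List Int)) :=
  (List.foldl
    (fun (st : List (List (List Int)) × Int) i =>
      let n := PySem.List.pyGetD num_rounds_per_game i 0
      let game := List.foldl
        (fun (g : List (List Int)) j =>
          let rwf := PySem.List.pyGetD red_words_flipped_by_round j 0
          let bwf := PySem.List.pyGetD blue_words_flipped_by_round j 0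
          let bywf := PySem.List.pyGetD bystander_words_flipped_by_round j 0
          let awf := PySem.List.pyGetD assassin_words_flipped_by_round j 0
          g ++ [[rwf, bwf, bywf, awf]])
        [] (PySem.List.pyRange st.2 (st.2 + n) 1)
      (st.1 ++ [game], st.2 + n))
    ([], 0) (PySem.List.pyRange 0 (PySem.List.len num_rounds_per_game) 1)).1

-- ===== PORT B =====
-- B: one flat pass builds all event rows, then each game's sublist is a slice of it.
def get_event_arrays_alt (num_rounds_per_game : List Int) (red_words_flipped_by_round : List Int) (blue_words_flipped_by_round : List Int) (bystander_words_flipped_by_round : List Int) (assassin_words_flipped_by_round : List Int) : List (List (List Int)) :=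
  let total := List.foldl (fun s n => s + n) 0 num_rounds_per_game
  let events := (PySem.List.pyRange 0 total 1).map
    (fun j => [PySem.List.pyGetD red_words_flipped_by_round j 0,
               PySem.List.pyGetD blue_words_flipped_by_round j 0,
               PySem.List.pyGetD bystander_words_flipped_by_round j 0,
               PySem.List.pyGetD assassin_words_flipped_by_round j 0])
  (List.foldl
    (fun (st : List (List (List Int)) × Int) n =>
      (st.1 ++ [PySem.List.slice events (some st.2) (some (st.2 + n))], st.2 + n))
    ([], 0) num_rounds_per_game).1

-- ===== PRECONDITION & SPEC =====
-- Pre_ excludes inputs on which A raises IndexError (a positive round count reaching past the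
-- end of a flat array) and inputs with negative round counts that make a later positive game
-- read rows via Python's negative-index wraparound or past the final total, artefacts of A's
-- running index; games with non-positive counts are simply empty and stay inside Pre_.
def Pre_get_event_arrays (num_rounds_per_game : List Int) (red_words_flipped_by_round : List Int) (blue_words_flipped_by_round : List Int) (bystander_words_flipped_by_round : List Int) (assassin_words_flipped_by_round : List Int) : Prop :=
  ∀ i : Nat, i < num_rounds_per_game.length → 0 < num_rounds_per_game.getD i 0 →
    0 ≤ (num_rounds_per_game.take i).sum ∧
    (num_rounds_per_game.take i).sum + num_rounds_per_game.getD i 0 ≤ num_rounds_per_game.sum ∧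
    (num_rounds_per_game.take i).sum + num_rounds_per_game.getD i 0 ≤ red_words_flipped_by_round.length ∧
    (num_rounds_per_game.take i).sum + num_rounds_per_game.getD i 0 ≤ blue_words_flipped_by_round.length ∧
    (num_rounds_per_game.take i).sum + num_rounds_per_game.getD i 0 ≤ bystander_words_flipped_by_round.length ∧
    (num_rounds_per_game.take i).sum + num_rounds_per_game.getD i 0 ≤ assassin_words_flipped_by_round.length
instance (num_rounds_per_game : List Int) (red_words_flipped_by_round : List Int) (blue_words_flipped_by_round : List Int) (bystander_words_flipped_by_round : List Int) (assassin_words_flipped_by_round : List Int) : Decidable (Pre_get_event_arrays num_rounds_per_game red_words_flipped_by_round blue_words_flipped_by_round bystander_words_flipped_by_round assassin_words_flipped_by_round) := by unfold Pre_get_event_arrays; infer_instance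

def pvWitness_get_event_arrays : List Int × List Int × List Int × List Int × List Int :=
  ([2, 1], [1, 2, 3], [4, 5, 6], [7, 8, 9], [0, 0, 0])

def Spec_get_event_arrays (num_rounds_per_game : List Int) (red_words_flipped_by_round : List Int) (blue_words_flipped_by_round : List Int) (bystander_words_flipped_by_round : List Int) (assassin_words_flipped_by_round : List Int) (out : List (List (List Int))) : Prop := out = get_event_arrays_alt num_rounds_per_game red_words_flipped_by_round blue_words_flipped_by_round bystander_words_flipped_by_round assassin_words_flipped_by_round
instance (num_rounds_per_game : List Int) (red_words_flipped_by_round : List Int) (blue_words_flipped_by_round : List Int) (bystander_words_flipped_by_round : List Int) (assassin_words_flipped_by_round : List Int) (out : List (List (List Int))) : Decidable (Spec_get_event_arrays num_rounds_per_game red_words_flipped_by_round blue_words_flipped_by_round bystander_words_flipped_by_round assassin_words_flipped_by_round out) := by unfold Spec_get_event_arrays; infer_instance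

-- ===== CLAIM (what is proved, stated in full; the proofs are below) =====
def Claim_equal_get_event_arrays : Prop := ∀ (num_rounds_per_game : List Int) (red_words_flipped_by_round : List Int) (blue_words_flipped_by_round : List Int) (bystander_words_flipped_by_round : List Int) (assassin_words_flipped_by_round : List Int), Dom_get_event_arrays num_rounds_per_game red_words_flipped_by_round blue_words_flipped_by_round bystander_words_flipped_by_round assassin_words_flipped_by_round → Pre_get_event_arrays num_rounds_per_game red_words_flipped_by_round blue_words_flipped_by_round bystander_words_flipped_by_round assassin_words_flipped_by_round → Spec_get_event_arrays num_rounds_per_game red_words_flipped_by_round blue_words_flipped_by_round bystander_words_flipped_by_round assassin_words_flipped_by_round (get_event_arrays num_rounds_per_game red_words_flipped_by_round blue_words_flipped_by_round bystander_words_flipped_by_round assassin_words_flipped_by_round)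

-- ===== LEMMAS AND PROOFS =====

-- A list with positive sum has a first positive entry, preceded by a non-positive prefix.
lemma exists_first_pos : ∀ (l : List Int), 0 < l.sum →
    ∃ i : Nat, i < l.length ∧ 0 < l.getD i 0 ∧ (l.take i).sum ≤ 0 := by
  intro l
  induction l with
  | nil => intro h; simp at h
  | cons n rest ih =>
    intro h
    by_cases hn : 0 < n
    · exact ⟨0, by simp, by simpa, by simp⟩
    · have hr : 0 < rest.sum := by simp [List.sum_cons] at h; omega
      obtain ⟨i, hi, hpos, hpre⟩ := ih hr
      exact ⟨i + 1, by simpa using hi, by simpa using hpos,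
        by simp [List.take_succ_cons, List.sum_cons]; omega⟩

-- A slice [off, off+n) with n ≤ 0 is empty, unless a negative stop wraps into a nonempty flat list.
lemma slice_nonpos_nil (f : Int → List Int) (total off n : Int) (hn : n ≤ 0)
    (h : ¬ (off + n < 0 ∧ 0 < total + (off + n))) :
    PySem.List.slice ((PySem.List.pyRange 0 total 1).map f) (some off) (some (off + n)) = [] := by
  apply List.eq_nil_of_length_eq_zero
  rw [PySem.List.length_slice]
  have hlen : ((PySem.List.pyRange 0 total 1).map f).length = total.toNat := by
    simp [PySem.List.length_pyRange_one]
  rw [hlen]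
  unfold PySem.List.clampIdx
  split_ifs <;> omega

-- A slice [off, off+n) of the flat row list equals the rows for indices off .. off+n-1.
lemma slice_map_pyRange_eq (f : Int → List Int) (total off n : Int)
    (h0 : 0 ≤ off) (hn : 0 ≤ n) (h2 : off + n ≤ total) :
    PySem.List.slice ((PySem.List.pyRange 0 total 1).map f) (some off) (some (off + n))
      = (PySem.List.pyRange off (off + n) 1).map f := by
  rw [PySem.List.slice_toNat _ h0 (by omega)]
  apply List.ext_getElem
  · simp [PySem.List.length_pyRange_one]
    omega
  · intro k h1 h2'
    rw [List.getElem_take, List.getElem_drop, List.getElem_map, List.getElem_map,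
        PySem.List.getElem_pyRange_one, PySem.List.getElem_pyRange_one]
    congr 1
    have hk : (k : Int) < n := by
      have := h2'
      simp [PySem.List.length_pyRange_one] at this
      omega
    omega

-- The two per-game folds agree: every positive game fits inside the flat list, and a
-- non-positive game yields [] on both sides (a wrapping stop would force a later positive
-- game to start at a negative offset, contradicting the hypothesis).
lemma partition_loop_eq (f : Int → List Int) (total : Int) :
    ∀ (nums : List Int) (off : Int) (acc : List (List (List Int))),
      off + nums.sum = total →
      (∀ i : Nat, i < nums.length → 0 < nums.getD i 0 →
        0 ≤ off + (nums.take i).sum ∧ off + (nums.take i).sum + nums.getD i 0 ≤ total) →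
      List.foldl (fun (st : List (List (List Int)) × Int) n =>
          (st.1 ++ [(PySem.List.pyRange st.2 (st.2 + n) 1).map f], st.2 + n)) (acc, off) nums
        = List.foldl (fun (st : List (List (List Int)) × Int) n =>
          (st.1 ++ [PySem.List.slice ((PySem.List.pyRange 0 total 1).map f) (some st.2) (some (st.2 + n))],
           st.2 + n)) (acc, off) nums := by
  intro nums
  induction nums with
  | nil => intro off acc _ _; rfl
  | cons n rest ih =>
    intro off acc htot hok
    simp only [List.foldl_cons]
    have hhead : (PySem.List.pyRange off (off + n) 1).map f
        = PySem.List.slice ((PySem.List.pyRange 0 total 1).map f) (some off) (some (off + n)) := by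
      by_cases hn : 0 < n
      · obtain ⟨h0, h1⟩ := hok 0 (by simp) (by simpa)
        simp only [List.take_zero, List.sum_nil, add_zero, List.getD_cons_zero] at h0 h1
        exact (slice_map_pyRange_eq f total off n h0 (le_of_lt hn) h1).symm
      · rw [PySem.List.pyRange_one_eq_nil (by omega)]
        rw [List.map_nil]
        refine (slice_nonpos_nil f total off n (by omega) ?_).symm
        rintro ⟨hneg, hwrap⟩
        have hr : 0 < rest.sum := by
          simp [List.sum_cons] at htot; omega
        obtain ⟨i, hi, hpos, hpre⟩ := exists_first_pos rest hr
        have := (hok (i + 1) (by simpa using hi) (by simpa using hpos)).1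
        simp [List.take_succ_cons, List.sum_cons] at this
        omega
    rw [hhead]
    apply ih (off + n)
    · simp [List.sum_cons] at htot; omega
    · intro i hi hpos
      have := hok (i + 1) (by simpa using hi) (by simpa using hpos)
      simpa [List.take_succ_cons, add_assoc, add_comm, add_left_comm] using this

-- ===== VERDICT (by name: the statement is the Claim_ definition above) =====
theorem get_event_arrays_spec : Claim_equal_get_event_arrays := by
  intro nums red blue byst asn _ hpre
  unfold Spec_get_event_arrays get_event_arrays get_event_arrays_alt
  simp only [PySem.List.foldl_append_singleton_eq_map, List.nil_append]
  have hfold : List.foldl (fun s n => s + n) 0 nums = nums.sum := by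
    simpa using (List.sum_eq_foldl (l := nums)).symm
  rw [hfold]
  rw [PySem.List.foldl_pyRange_zero_pyGetD nums 0
    (fun (st : List (List (List Int)) × Int) n =>
      (st.1 ++ [(PySem.List.pyRange st.2 (st.2 + n) 1).map
        (fun x => [PySem.List.pyGetD red x 0, PySem.List.pyGetD blue x 0,
                   PySem.List.pyGetD byst x 0, PySem.List.pyGetD asn x 0])], st.2 + n))
    ([], 0)]
  rw [partition_loop_eq _ nums.sum nums 0 [] (by omega)
    (fun i hi hpos => by
      obtain ⟨h0, h1, _⟩ := hpre i hi hpos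
      exact ⟨by omega, by omega⟩)]
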